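-- pv_equiv track=rewrite | github.com/Seung-Joon/JCET_StatsChipPacKorea_DB_FIX_Case2 | Case2_Script Generator.py | formatFixData
-- ===== SOURCE A (Python) =====
-- def formatFixData(data):
--     targetLotid = data[0][0]
--     data = list(map(lambda x: [x[1], x[2]], data)) # COM_LOCATION, COM_LOT 데이터를 추출하여 재가공
--     keys = list(set(list(map(lambda x: x[0], data)))) # COM_LOCATION 리스트 생성
--
--     dataSets = {}
--     for i in keys: dataSets[i] = []
--     for j in data: dataSets[j[0]].append(j[1]) if (j != 'None') else ""
--
--     fixData = {}
--     for key in dataSets.keys():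
--         if None in dataSets[key]:
--             dataSets[key] = list(filter(lambda x: x != None, dataSets[key]))
--             fixData[key] = dataSets[key][0]
--
--     return {targetLotid: fixData}
-- ===== SOURCE B (Python) =====
-- def formatFixData(data):
--     targetLotid = data[0][0]
--     vals = {}      # location -> non-None lots, in first-appearance order
--     hasNone = {}   # location -> was a None lot seen?
--     for row in data:
--         loc, lot = row[1], row[2]
--         if loc not in vals:
--             vals[loc] = []
--             hasNone[loc] = False
--         if lot is None:
--             hasNone[loc] = True
--         else:
--             vals[loc].append(lot)
--     fixData = {loc: vals[loc][0] for loc in vals if hasNone[loc]}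
--     return {targetLotid: fixData}
-- ===== Notes on version B (the rewrite author's own statement) =====
-- stated objective: simpler
-- what changed: Replaces A's three-phase pipeline (remap rows, build a key set, pre-initialise a dict of lists, append all lots including None, then post-filter the Nones per key) by one single pass over the rows maintaining two dicts - non-None lots per location and a has-a-None flag per location - followed by one comprehension taking the first stored lot of each flagged location.
-- outside the precondition, e.g. on formatFixData([[None, 'x', 'y']]): A returns {None: {}}, B returns {None: {}}
import Mathlib
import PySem

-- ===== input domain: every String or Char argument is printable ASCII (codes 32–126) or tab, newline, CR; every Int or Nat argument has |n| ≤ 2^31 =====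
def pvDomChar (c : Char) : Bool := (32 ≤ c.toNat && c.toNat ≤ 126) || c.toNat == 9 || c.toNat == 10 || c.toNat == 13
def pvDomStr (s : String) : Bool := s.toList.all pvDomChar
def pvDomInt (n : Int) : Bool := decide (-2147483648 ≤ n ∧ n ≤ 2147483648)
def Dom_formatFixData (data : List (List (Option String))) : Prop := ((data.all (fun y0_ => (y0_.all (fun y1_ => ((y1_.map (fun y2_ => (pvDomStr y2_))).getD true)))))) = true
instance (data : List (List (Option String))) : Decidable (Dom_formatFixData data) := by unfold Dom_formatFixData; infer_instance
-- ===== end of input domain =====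

-- B replaces A's multi-phase pipeline (remap, key set, pre-initialised dict of lists, post-filter)
-- by one single pass with two dicts (non-None lots per location, has-None flag); same return value.
-- Note: A iterates over list(set(...)) whose Python order is hash order; dict outputs are compared
-- order-insensitively, and both ports use first-occurrence order.

-- ===== PORT A =====
-- data[0][0]; `some (some t)` required since a None key is not a value of the String-keyed return type
def pvTarget (data : List (List (Option String))) : Option (Option String) :=
  (PySem.List.pyGet? data 0).bind (fun r => PySem.List.pyGet? r 0)

-- lambda x: [x[1], x[2]]
def pvRowPair (r : List (Option String)) : Option (Option String × Option String) :=
  (PySem.List.pyGet? r 1).bind (fun a => (PySem.List.pyGet? r 2).map (fun b => (a, b)))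

def pvRemap : List (List (Option String)) → Option (List (Option String × Option String))
  | [] => some []
  | r :: rest => (pvRowPair r).bind (fun p => (pvRemap rest).map (p :: ·))

-- fixData[key] = dataSets[key][0]: a None key or an empty filtered list leaves the type (none)
def pvPick (k : Option String) (h : Option (Option String)) : Option (String × String) :=
  match k, h with
  | some ks, some (some v) => some (ks, v)
  | _, _ => none

-- the final loop building fixData
def pvFixA : List (Option String × List (Option String)) → Option (List (String × String))
  | [] => some []
  | (k, lots) :: rest =>
    if none ∈ lots then
      (pvPick k (lots.filter (fun x => x ≠ none)).head?).bind
        (fun q => (pvFixA rest).map (q :: ·))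
    else pvFixA rest

def formatFixData (data : List (List (Option String))) : List (String × List (String × String)) :=
  match pvTarget data with
  | some (some targetLotid) =>
    match pvRemap data with
    | some pairs =>
      let keys : PySem.Set (Option String) := PySem.Set.ofList (pairs.map Prod.fst)
      let ds0 : PySem.Dict (Option String) (List (Option String)) :=
        keys.foldl (fun d k => d.insert k []) PySem.Dict.empty
      let ds := pairs.foldl (fun d p => d.modify p.1 [] (fun l => l ++ [p.2])) ds0
      match pvFixA ds.items with
      | some fix => [(targetLotid, fix)]
      | none => []
    | none => []
  | _ => []

-- ===== PORT B =====
-- loc, lot = row[1], row[2] (a location may be None: the dicts are keyed by Option String)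
def pvRowLocLot (r : List (Option String)) : Option (Option String × Option String) :=
  (PySem.List.pyGet? r 1).bind (fun loc =>
    (PySem.List.pyGet? r 2).map (fun lot => (loc, lot)))

def pvStepB (st : PySem.Dict (Option String) (List String) × PySem.Dict (Option String) Bool)
    (p : Option String × Option String) :
    PySem.Dict (Option String) (List String) × PySem.Dict (Option String) Bool :=
  let st1 := if st.1.contains p.1 then st else (st.1.insert p.1 [], st.2.insert p.1 false)
  match p.2 with
  | none => (st1.1, st1.2.insert p.1 true)
  | some s => (st1.1.modify p.1 [] (fun l => l ++ [s]), st1.2)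

def pvLoopB : List (List (Option String)) →
    (PySem.Dict (Option String) (List String) × PySem.Dict (Option String) Bool) →
    Option (PySem.Dict (Option String) (List String) × PySem.Dict (Option String) Bool)
  | [], st => some st
  | r :: rest, st => (pvRowLocLot r).bind (fun p => pvLoopB rest (pvStepB st p))

-- vals[loc][0] for a flagged loc: a None key or an empty list leaves the type (none)
def pvPickB (k : Option String) (h : Option String) : Option (String × String) :=
  match k, h with
  | some l, some v => some (l, v)
  | _, _ => none

-- {loc: vals[loc][0] for loc in vals if hasNone[loc]}
def pvFixB (hn : PySem.Dict (Option String) Bool) :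
    List (Option String × List String) → Option (List (String × String))
  | [] => some []
  | (k, vs) :: rest =>
    if hn.getD k false then
      (pvPickB k vs.head?).bind (fun q => (pvFixB hn rest).map (q :: ·))
    else pvFixB hn rest

def formatFixData_alt (data : List (List (Option String))) : List (String × List (String × String)) :=
  match (PySem.List.pyGet? data 0).bind (fun r => PySem.List.pyGet? r 0) with
  | some (some targetLotid) =>
    match pvLoopB data (PySem.Dict.empty, PySem.Dict.empty) with
    | some (vals, hn) =>
      match pvFixB hn vals.items with
      | some fix => [(targetLotid, fix)]
      | none => []
    | none => []
  | _ => []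

-- ===== PRECONDITION & SPEC =====
-- Pre_ excludes exactly (i) inputs where A raises: empty data, an empty first row, a row shorter
-- than 3 (IndexError), or a location all of whose lots are None (IndexError on the empty filtered
-- list; B raises there too); and (ii) inputs where A's returned dict has a None key (a None
-- lot-id data[0][0], or a None location that has a None lot), which is not a value of the
-- declared String-keyed return type — B returns the identical dict there in Python.
def Pre_formatFixData (data : List (List (Option String))) : Prop :=
  ((data.head?.bind List.head?).getD none).isSome = true ∧
  (∀ r ∈ data, 3 ≤ r.length) ∧
  (∀ r ∈ data, r[2]? = some none →
    r[1]? ≠ some none ∧ ∃ r' ∈ data, r'[1]? = r[1]? ∧ r'[2]? ≠ some none ∧ r'[2]? ≠ none)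
instance (data : List (List (Option String))) : Decidable (Pre_formatFixData data) := by
  unfold Pre_formatFixData; infer_instance

def pvWitness_formatFixData : List (List (Option String)) :=
  [[some "L1", some "A", none], [some "x", some "A", some "v"], [some "y", some "B", some "w"]]

def Spec_formatFixData (data : List (List (Option String))) (out : List (String × List (String × String))) : Prop := out = formatFixData_alt data
instance (data : List (List (Option String))) (out : List (String × List (String × String))) : Decidable (Spec_formatFixData data out) := by unfold Spec_formatFixData; infer_instance

-- ===== CLAIM (what is proved, stated in full; the proofs are below) =====
def Claim_equal_formatFixData : Prop := ∀ (data : List (List (Option String))), Dom_formatFixData data → Pre_formatFixData data → Spec_formatFixData data (formatFixData data)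


-- ===== LEMMAS AND PROOFS =====

-- the location of a row (its COM_LOCATION entry) and its lot
def pvLoc (r : List (Option String)) : Option String := r[1]?.getD none
def pvLot (r : List (Option String)) : Option String := r[2]?.getD none
def pvSP (data : List (List (Option String))) : List (Option String × Option String) :=
  data.map (fun r => (pvLoc r, pvLot r))
def pvLots (sp : List (Option String × Option String)) (l : Option String) : List (Option String) :=
  (sp.filter (fun p => p.1 == l)).map Prod.snd

theorem pvGet1 (r : List (Option String)) (h3 : 3 ≤ r.length) :
    r[1]? = some (pvLoc r) := by
  have hlt : 1 < r.length := by omega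
  rw [List.getElem?_eq_getElem hlt]
  simp [pvLoc, List.getElem?_eq_getElem hlt]

theorem pvGet2 (r : List (Option String)) (h3 : 3 ≤ r.length) :
    r[2]? = some (pvLot r) := by
  have hlt : 2 < r.length := by omega
  rw [List.getElem?_eq_getElem hlt]
  simp [pvLot, List.getElem?_eq_getElem hlt]

theorem pvPyGet1 (r : List (Option String)) : PySem.List.pyGet? r 1 = r[1]? := by
  simpa using PySem.List.pyGet?_of_nonneg (xs := r) (i := 1) (by norm_num)

theorem pvPyGet2 (r : List (Option String)) : PySem.List.pyGet? r 2 = r[2]? := by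
  simpa using PySem.List.pyGet?_of_nonneg (xs := r) (i := 2) (by norm_num)

theorem pvRowPair_eq (r : List (Option String)) (h3 : 3 ≤ r.length) :
    pvRowPair r = some (pvLoc r, pvLot r) := by
  simp [pvRowPair, pvPyGet1, pvPyGet2, pvGet1 r h3, pvGet2 r h3]

theorem pvRowLocLot_eq (r : List (Option String)) (h3 : 3 ≤ r.length) :
    pvRowLocLot r = some (pvLoc r, pvLot r) := by
  simp [pvRowLocLot, pvPyGet1, pvPyGet2, pvGet1 r h3, pvGet2 r h3]

theorem pvRemap_eq (data : List (List (Option String)))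
    (h : ∀ r ∈ data, 3 ≤ r.length) :
    pvRemap data = some (pvSP data) := by
  induction data with
  | nil => rfl
  | cons r rest ih =>
    rw [pvRemap, pvRowPair_eq r (h r (by simp)), ih (fun r hm => h r (by simp [hm]))]
    rfl

theorem pvLoopB_eq (data : List (List (Option String)))
    (st : PySem.Dict (Option String) (List String) × PySem.Dict (Option String) Bool)
    (h : ∀ r ∈ data, 3 ≤ r.length) :
    pvLoopB data st = some ((pvSP data).foldl pvStepB st) := by
  induction data generalizing st with
  | nil => rfl
  | cons r rest ih =>
    rw [pvLoopB, pvRowLocLot_eq r (h r (by simp))]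
    simp only [Option.bind_some]
    rw [ih _ (fun r hm => h r (by simp [hm]))]
    rfl

theorem pvLots_cons (a : Option String) (o : Option String)
    (rest : List (Option String × Option String)) (l : Option String) :
    pvLots ((a, o) :: rest) l = if a = l then o :: pvLots rest l else pvLots rest l := by
  by_cases h : a = l <;> simp [pvLots, h]

-- the single-pass loop invariant of B
theorem pvStateB (sp : List (Option String × Option String))
    (vals : PySem.Dict (Option String) (List String)) (hn : PySem.Dict (Option String) Bool)
    (hK : vals.keys.Nodup) (hC : ∀ l, hn.contains l = vals.contains l) :
    (sp.foldl pvStepB (vals, hn)).1.keys = PySem.Set.update vals.keys (sp.map Prod.fst) ∧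
    (sp.foldl pvStepB (vals, hn)).1.keys.Nodup ∧
    (∀ l, (sp.foldl pvStepB (vals, hn)).1.getD l [] = vals.getD l [] ++ (pvLots sp l).filterMap id) ∧
    (∀ l, (sp.foldl pvStepB (vals, hn)).2.getD l false
        = (hn.getD l false || decide (none ∈ pvLots sp l))) := by
  induction sp generalizing vals hn with
  | nil => simp [pvLots, hK]
  | cons p rest ih =>
    obtain ⟨a, o⟩ := p
    have hmemkeys : vals.contains a = true ↔ a ∈ vals.keys := PySem.Dict.contains_iff_mem_keys vals a
    -- the state after one step, uniformly
    set vals1 := (if vals.contains a then vals else vals.insert a []) with hv1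
    set hn1 := (if vals.contains a then hn else hn.insert a false) with hh1
    have hstep : pvStepB (vals, hn) (a, o) = (match o with
        | none => (vals1, hn1.insert a true)
        | some s => (vals1.modify a [] (fun l => l ++ [s]), hn1)) := by
      by_cases hc : vals.contains a <;> cases o <;> simp [pvStepB, hc, hv1, hh1]
    -- facts about vals1 / hn1
    have hkeys1 : vals1.keys = PySem.Set.add vals.keys a := by
      by_cases hc : vals.contains a = true
      · rw [hv1, if_pos hc, PySem.Set.add_of_mem (hmemkeys.mp hc)]
      · have hc' : vals.contains a = false := by simpa using hc
        rw [hv1, if_neg (by simp [hc']), PySem.Dict.keys_insert_of_not_contains _ _ hc']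
        have hnm : a ∉ vals.keys := fun hmem => by simp [hmemkeys.mpr hmem] at hc'
        unfold PySem.Set.add
        have : PySem.Set.contains vals.keys a = false := by
          simp only [PySem.Set.contains, List.contains_eq_mem, decide_eq_false_iff_not]
          exact hnm
        simp [hnm]
    have hK1 : vals1.keys.Nodup := by
      rw [hkeys1]
      unfold PySem.Set.add
      by_cases hm : a ∈ vals.keys
      · simp [hm, hK]
      · simp [hm, List.nodup_append, hK]
        exact fun x hx he => hm (he ▸ hx)
    have hC1 : ∀ l, hn1.contains l = vals1.contains l := by
      intro l
      by_cases hc : vals.contains a = true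
      · simp [hv1, hh1, hc, hC l]
      · have hc' : vals.contains a = false := by simpa using hc
        simp [hv1, hh1, hc', PySem.Dict.contains_insert, hC l]
    have hgv1 : ∀ l, vals1.getD l [] = vals.getD l [] := by
      intro l
      by_cases hc : vals.contains a = true
      · simp [hv1, hc]
      · have hc' : vals.contains a = false := by simpa using hc
        rw [hv1, if_neg (by simp [hc']), PySem.Dict.getD_insert]
        by_cases hla : l = a
        · subst hla; rw [PySem.Dict.getD_of_not_contains _ _ hc']; simp
        · simp [hla]
    have hgh1 : ∀ l, hn1.getD l false = hn.getD l false := by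
      intro l
      by_cases hc : vals.contains a = true
      · simp [hh1, hc]
      · have hc' : vals.contains a = false := by simpa using hc
        have hcn : hn.contains a = false := by rw [hC a]; exact hc'
        rw [hh1, if_neg (by simp [hc']), PySem.Dict.getD_insert]
        by_cases hla : l = a
        · subst hla; rw [PySem.Dict.getD_of_not_contains _ _ hcn]; simp
        · simp [hla]
    have hca1 : vals1.contains a = true := by
      by_cases hc : vals.contains a = true
      · simp [hv1, hc]
      · have hc' : vals.contains a = false := by simpa using hc
        rw [hv1, if_neg (by simp [hc']), PySem.Dict.contains_insert]; simp
    -- now the two lot cases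
    cases o with
    | none =>
      rw [List.foldl_cons, hstep]
      have := ih vals1 (hn1.insert a true) hK1
        (fun l => by rw [PySem.Dict.contains_insert, hC1 l]
                     by_cases hla : l = a
                     · subst hla; simp [hca1]
                     · simp [hla])
      refine ⟨?_, this.2.1, ?_, ?_⟩
      · rw [this.1, hkeys1]; simp [PySem.Set.update]
      · intro l
        rw [this.2.2.1 l, hgv1 l, pvLots_cons]
        by_cases hla : a = l <;> simp [hla]
      · intro l
        rw [this.2.2.2 l, PySem.Dict.getD_insert, pvLots_cons]
        by_cases hla : a = l
        · subst hla; simp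
        · rw [if_neg (fun h => hla h.symm), hgh1 l]
          simp [hla]
    | some s =>
      rw [List.foldl_cons, hstep]
      have hK2 : (vals1.modify a [] (fun l => l ++ [s])).keys.Nodup := by
        have := PySem.Dict.nodup_keys_foldl_modify_key [(a, s)] Prod.fst []
          (fun _ p l => l ++ [p.2]) vals1 hK1
        simpa using this
      have hkm : (vals1.modify a [] (fun l => l ++ [s])).keys = vals1.keys := by
        rw [PySem.Dict.keys_modify, PySem.Dict.keys_insert_of_contains _ _ hca1]
      have := ih (vals1.modify a [] (fun l => l ++ [s])) hn1 hK2
        (fun l => by rw [PySem.Dict.contains_modify, hC1 l]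
                     by_cases hla : l = a
                     · subst hla; simp [hca1]
                     · simp [hla])
      refine ⟨?_, this.2.1, ?_, ?_⟩
      · rw [this.1, hkm, hkeys1]; simp [PySem.Set.update]
      · intro l
        rw [this.2.2.1 l, PySem.Dict.getD_modify, pvLots_cons]
        by_cases hla : a = l
        · subst hla; rw [if_pos rfl, hgv1 a]; simp
        · rw [if_neg (fun h => hla h.symm), hgv1 l]
          simp [hla]
      · intro l
        rw [this.2.2.2 l, hgh1 l, pvLots_cons]
        by_cases hla : a = l <;> simp [hla]

theorem pvSet_update_of_mem' {xs : List (Option String)} {s : PySem.Set (Option String)}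
    (h : ∀ x ∈ xs, x ∈ s) : PySem.Set.update s xs = s := by
  induction xs generalizing s with
  | nil => rfl
  | cons x rest ih =>
    unfold PySem.Set.update at *
    rw [List.foldl_cons, PySem.Set.add_of_mem (h x (by simp))]
    exact ih (fun y hy => h y (by simp [hy]))

-- A's dict-of-lists, characterised: its items are the locations in first-occurrence
-- order, each with all its lots (Nones included) in row order
theorem pvA_items (sp : List (Option String × Option String)) :
    (sp.foldl (fun d p => d.modify p.1 [] (fun l => l ++ [p.2]))
        ((PySem.Set.ofList (sp.map Prod.fst)).foldl
          (fun d k => d.insert k []) PySem.Dict.empty)).items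
      = (PySem.Set.ofList (sp.map Prod.fst)).map (fun l => (l, pvLots sp l)) := by
  set S := PySem.Set.ofList (sp.map Prod.fst) with hS
  set ds0 := S.foldl (fun d k => d.insert k []) (PySem.Dict.empty) with hds0
  have hSnd : S.Nodup := PySem.Set.nodup_ofList _
  have hitems0 : ds0.items = S.map (fun k => (k, ([] : List (Option String)))) := by
    rw [hds0]
    have := PySem.Dict.items_foldl_insert_fresh S (fun k => k)
      (fun _ => ([] : List (Option String))) PySem.Dict.empty
      (fun a _ => PySem.Dict.contains_empty a) (by simpa using hSnd)
    simpa using this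
  have hkeys0 : ds0.keys = S := by
    show ds0.items.map Prod.fst = _
    simp [hitems0, List.map_map, Function.comp_def]
  have hnd0 : ds0.keys.Nodup := by rw [hkeys0]; exact hSnd
  have hget0 : ∀ k, ds0.getD k [] = [] := by
    intro k
    by_cases hc : ds0.contains k = true
    · have hk : k ∈ ds0.keys := (PySem.Dict.contains_iff_mem_keys _ _).mp hc
      have : (k, ([] : List (Option String))) ∈ ds0.items := by
        rw [hitems0]
        rw [hkeys0] at hk
        exact List.mem_map.mpr ⟨k, hk, rfl⟩
      exact PySem.Dict.getD_of_mem_items _ this hnd0 []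
    · exact PySem.Dict.getD_of_not_contains _ _ (by simpa using hc)
  set ds := sp.foldl (fun d p => d.modify p.1 [] (fun l => l ++ [p.2])) ds0 with hds
  have hkeys : ds.keys = S := by
    rw [hds]
    rw [PySem.Dict.keys_foldl_modify_key sp Prod.fst [] (fun _ p l => l ++ [p.2]) ds0]
    rw [hkeys0]
    exact pvSet_update_of_mem' (fun x hx => (PySem.Set.mem_ofList _ _).mpr hx)
  have hnd : ds.keys.Nodup := by rw [hkeys]; exact hSnd
  have hget : ∀ l, ds.getD l [] = pvLots sp l := by
    intro l
    rw [hds, PySem.Dict.getD_foldl_modify_append sp ds0 l, hget0, List.nil_append, pvLots]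
  rw [PySem.Dict.items_eq_map_keys ds hnd [], hkeys]
  apply List.map_congr_left
  intro l _
  rw [hget l]

theorem pvFilter_ne_none (xs : List (Option String)) :
    xs.filter (fun x => x ≠ none) = (xs.filterMap id).map some := by
  induction xs with
  | nil => rfl
  | cons x rest ih => cases x <;> simp <;> exact (by simpa using ih)

-- the two final loops agree, location by location
theorem pvFix_eq (sp : List (Option String × Option String)) (hn : PySem.Dict (Option String) Bool)
    (hhn : ∀ l, hn.getD l false = decide (none ∈ pvLots sp l))
    (hne : ∀ l, none ∈ pvLots sp l → (pvLots sp l).filterMap id ≠ [])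
    (L : List (Option String)) :
    pvFixA (L.map (fun l => (l, pvLots sp l)))
      = pvFixB hn (L.map (fun l => (l, (pvLots sp l).filterMap id))) := by
  induction L with
  | nil => rfl
  | cons l L ih =>
    rw [List.map_cons, List.map_cons, pvFixA, pvFixB]
    by_cases hmem : none ∈ pvLots sp l
    · cases hfm : (pvLots sp l).filterMap id with
      | nil => exact absurd hfm (hne l hmem)
      | cons v t =>
        rw [if_pos hmem, pvFilter_ne_none, hfm]
        rw [if_pos (by rw [hhn l]; simpa using hmem)]
        cases l with
        | none =>
          simp [pvPick, pvPickB]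
        | some ls =>
          simp only [List.map_cons, List.head?_cons, pvPick, pvPickB, Option.bind_some]
          rw [ih]
    · rw [if_neg hmem, if_neg (by rw [hhn l]; simpa using hmem)]
      exact ih

-- ===== VERDICT (by name: the statement is the Claim_ definition above) =====
theorem formatFixData_spec : Claim_equal_formatFixData := by
  intro data _hDom hPre
  obtain ⟨h0, hlen, h23⟩ := hPre
  rcases data with _ | ⟨r0, rest0⟩
  · simp at h0
  rcases r0 with _ | ⟨x0, r0t⟩
  · simp at h0
  rcases x0 with _ | t
  · simp at h0
  set D := (some t :: r0t) :: rest0 with hD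
  set sp := pvSP D with hsp
  have hT : (PySem.List.pyGet? D 0).bind (fun r => PySem.List.pyGet? r 0) = some (some t) := by
    simp [hD, PySem.List.pyGet?_zero]
  have hremap : pvRemap D = some sp := pvRemap_eq D hlen
  have hloop : pvLoopB D (PySem.Dict.empty, PySem.Dict.empty)
      = some (sp.foldl pvStepB (PySem.Dict.empty, PySem.Dict.empty)) :=
    pvLoopB_eq D (PySem.Dict.empty, PySem.Dict.empty) hlen
  obtain ⟨hkeys, hnd, hgv, hgh⟩ := pvStateB sp PySem.Dict.empty PySem.Dict.empty
    (by simp [PySem.Dict.keys_empty]) (fun l => by simp [PySem.Dict.contains_empty])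
  rcases hstq : sp.foldl pvStepB (PySem.Dict.empty, PySem.Dict.empty) with ⟨vals, hn⟩
  rw [hstq] at hkeys hnd hgv hgh hloop
  set S := PySem.Set.ofList (sp.map Prod.fst) with hS
  have hkeys' : vals.keys = S := by
    rw [hkeys, PySem.Dict.keys_empty, PySem.Set.update_nil_left]
  have hitems_vals : vals.items = S.map (fun l => (l, (pvLots sp l).filterMap id)) := by
    rw [PySem.Dict.items_eq_map_keys vals hnd [], hkeys']
    apply List.map_congr_left
    intro l _
    rw [hgv l, PySem.Dict.getD_empty, List.nil_append]
  have hhn' : ∀ l, hn.getD l false = decide (none ∈ pvLots sp l) := fun l => by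
    rw [hgh l, PySem.Dict.getD_empty, Bool.false_or]
  -- a location whose lots contain a None also has a non-None lot (and is not the None location)
  have hrow : ∀ l, none ∈ pvLots sp l →
      ∃ r ∈ D, pvLoc r = l ∧ r[2]? = some none := by
    intro l hmem
    rw [pvLots] at hmem
    obtain ⟨p, hpf, hp2⟩ := List.mem_map.mp hmem
    have hpsp : p ∈ sp := (List.mem_filter.mp hpf).1
    have hpl : p.1 = l := by
      have := (List.mem_filter.mp hpf).2
      simpa using this
    obtain ⟨r, hrD, hrp⟩ := List.mem_map.mp hpsp
    refine ⟨r, hrD, by rw [← hpl, ← hrp], ?_⟩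
    rw [pvGet2 r (hlen r hrD)]
    have : pvLot r = none := by rw [← hp2, ← hrp]
    rw [this]
  have hne : ∀ l, none ∈ pvLots sp l → (pvLots sp l).filterMap id ≠ [] := by
    intro l hmem
    obtain ⟨r, hrD, hrl, hr2⟩ := hrow l hmem
    obtain ⟨-, r', hr'D, h1eq, h2ne, -⟩ := h23 r hrD hr2
    have hr'2 : r'[2]? = some (pvLot r') := pvGet2 r' (hlen r' hr'D)
    have hlotne : pvLot r' ≠ none := by
      intro hx
      rw [hx] at hr'2
      exact h2ne hr'2
    obtain ⟨s, hs⟩ := Option.ne_none_iff_exists'.mp hlotne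
    have hloceq : pvLoc r' = l := by
      have : pvLoc r' = pvLoc r := by simp [pvLoc, h1eq]
      rw [this, hrl]
    have hmemsp : (l, some s) ∈ sp := by
      have : (pvLoc r', pvLot r') ∈ sp := List.mem_map.mpr ⟨r', hr'D, rfl⟩
      rwa [hloceq, hs] at this
    have hmemlots : some s ∈ pvLots sp l := by
      rw [pvLots]
      exact List.mem_map.mpr ⟨(l, some s), List.mem_filter.mpr ⟨hmemsp, by simp⟩, rfl⟩
    exact List.ne_nil_of_mem (List.mem_filterMap.mpr ⟨some s, hmemlots, rfl⟩)
  have hfix := pvFix_eq sp hn hhn' hne S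
  have hA := pvA_items sp
  show formatFixData D = formatFixData_alt D
  rw [formatFixData, formatFixData_alt]
  rw [show pvTarget D = some (some t) from hT, hT, hremap, hloop]
  simp only []
  rw [hA, hfix, hitems_vals]
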